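-- pv_equiv track=rewrite | github.com/81wallace18/fedranklite-slm | src/engine.py | _assign_tiers
-- ===== SOURCE A (Python) =====
-- def _assign_tiers(client_ids: list[int], tiers: list[dict]) -> dict[int, dict]:
--     assignment = {}
--     idx = 0
--     for tier in tiers:
--         for _ in range(tier["count"]):
--             if idx < len(client_ids):
--                 assignment[client_ids[idx]] = tier
--                 idx += 1
--     # remaining clients get last tier
--     for i in range(idx, len(client_ids)):
--         assignment[client_ids[i]] = tiers[-1]
--     return assignment
-- ===== SOURCE B (Python) =====
-- def _assign_tiers(client_ids: list[int], tiers: list[dict]) -> dict[int, dict]: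
--     # Consume the client list tier by tier with slicing (no running index, no
--     # per-slot loop), collecting (client, tier) pairs; build the dict once at
--     # the end from the pair list.
--     pairs = []
--     rest = client_ids
--     for tier in tiers:
--         n = max(tier["count"], 0)
--         pairs += [(cid, tier) for cid in rest[:n]]
--         rest = rest[n:]
--     pairs += [(cid, tiers[-1]) for cid in rest]
--     return dict(pairs)
-- ===== Notes on version B (the rewrite author's own statement) =====
-- stated objective: alternative
-- what changed: A walks a running index over per-tier slot loops and finishes with a remainder loop of inline dict inserts; B instead consumes the client list by slicing a per-tier chunk off it (no index, no per-slot loop), collects (client, tier) pairs, and builds the dict once with dict(pairs) at the end.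
import Mathlib
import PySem

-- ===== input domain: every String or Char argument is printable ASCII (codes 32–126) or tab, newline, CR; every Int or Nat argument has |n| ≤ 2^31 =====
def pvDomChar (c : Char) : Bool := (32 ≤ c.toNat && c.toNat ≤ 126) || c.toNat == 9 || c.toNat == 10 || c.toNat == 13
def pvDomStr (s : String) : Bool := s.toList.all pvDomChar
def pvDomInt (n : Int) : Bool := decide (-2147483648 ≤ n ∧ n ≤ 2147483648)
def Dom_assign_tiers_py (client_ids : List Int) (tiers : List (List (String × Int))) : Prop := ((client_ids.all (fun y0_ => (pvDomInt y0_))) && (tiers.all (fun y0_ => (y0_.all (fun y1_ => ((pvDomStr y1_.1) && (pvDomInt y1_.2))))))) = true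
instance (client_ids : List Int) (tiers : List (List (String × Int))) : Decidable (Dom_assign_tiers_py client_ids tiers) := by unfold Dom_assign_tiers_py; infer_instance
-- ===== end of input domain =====

-- B consumes the client list by slicing a per-tier chunk off it, collects (client, tier)
-- pairs, and builds the dict once at the end, replacing A's running index over per-slot
-- loops with inline inserts plus a remainder loop; same cost, a different decomposition.

-- tier["count"] (both Pythons contain this expression); default 0 is only reached outside Pre_
def tierCount (tier : List (String × Int)) : Int :=
  PySem.Dict.getD (PySem.Dict.mk tier) "count" 0

-- ===== PORT A =====
-- inner 'for _ in range(tier["count"])' loop of A (fuel = the range length)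
def aInner (client_ids : List Int) (tier : List (String × Int)) :
    Nat → (PySem.Dict Int (List (String × Int)) × Nat) → PySem.Dict Int (List (String × Int)) × Nat
  | 0, st => st
  | n + 1, (d, idx) =>
      if idx < client_ids.length then
        -- client_ids.getD is exact here: the branch guarantees idx is in range
        aInner client_ids tier n (d.insert (client_ids.getD idx 0) tier, idx + 1)
      else
        aInner client_ids tier n (d, idx)

def assign_tiers_py (client_ids : List Int) (tiers : List (List (String × Int))) : List (Int × List (String × Int)) :=
  let st := tiers.foldl (fun st tier => aInner client_ids tier (tierCount tier).toNat st)
              (PySem.Dict.empty, 0)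
  -- remaining clients get last tier; tiers[-1] raises on [] (excluded by Pre_), .getD [] unreached there
  ((PySem.List.pyRange (st.2 : Int) (client_ids.length : Int)).foldl
      (fun d i => d.insert (PySem.List.pyGetD client_ids i 0) ((PySem.List.pyGet? tiers (-1)).getD []))
      st.1).items

-- ===== PORT B =====
def assign_tiers_py_alt (client_ids : List Int) (tiers : List (List (String × Int))) : List (Int × List (String × Int)) :=
  let st := tiers.foldl
      (fun (st : List (Int × List (String × Int)) × List Int) tier =>
        let n := max (tierCount tier) 0
        (st.1 ++ (PySem.List.slice st.2 none (some n)).map (fun c => (c, tier)),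
         PySem.List.slice st.2 (some n) none))
      ([], client_ids)
  -- tiers[-1] raises on tiers = [] (excluded by Pre_ when rest ≠ []); when rest = [] the
  -- Python comprehension never evaluates it — .getD [] is unreached under Pre_
  (PySem.Dict.ofList
    (st.1 ++ st.2.map (fun c => (c, (PySem.List.pyGet? tiers (-1)).getD [])))).items

-- ===== PRECONDITION & SPEC =====
-- Pre_ excludes exactly the inputs where the Python A raises: a tier without a "count" key
-- (KeyError) and an empty tiers list with clients left over (IndexError at tiers[-1]).
def Pre_assign_tiers_py (client_ids : List Int) (tiers : List (List (String × Int))) : Prop :=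
  (∀ t ∈ tiers, ((PySem.Dict.mk t).get? "count").isSome = true) ∧ (tiers = [] → client_ids = [])

instance (client_ids : List Int) (tiers : List (List (String × Int))) : Decidable (Pre_assign_tiers_py client_ids tiers) := by unfold Pre_assign_tiers_py; infer_instance

def pvWitness_assign_tiers_py : List Int × (List (List (String × Int))) :=
  ([1, 2, 3], [[("count", 2)], [("count", 5)]])

def Spec_assign_tiers_py (client_ids : List Int) (tiers : List (List (String × Int))) (out : List (Int × List (String × Int))) : Prop := out = assign_tiers_py_alt client_ids tiers
instance (client_ids : List Int) (tiers : List (List (String × Int))) (out : List (Int × List (String × Int))) : Decidable (Spec_assign_tiers_py client_ids tiers out) := by unfold Spec_assign_tiers_py; infer_instance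

-- ===== CLAIM (what is proved, stated in full; the proofs are below) =====
def Claim_equal_assign_tiers_py : Prop := ∀ (client_ids : List Int) (tiers : List (List (String × Int))), Dom_assign_tiers_py client_ids tiers → Pre_assign_tiers_py client_ids tiers → Spec_assign_tiers_py client_ids tiers (assign_tiers_py client_ids tiers)

-- ===== LEMMAS AND PROOFS =====

-- A's tier loop, rephrased over an explicit slot list (one slot per range iteration)
def procSeg (cl : List Int) :
    (PySem.Dict Int (List (String × Int)) × Nat) → List (List (String × Int)) →
    PySem.Dict Int (List (String × Int)) × Nat
  | st, [] => st
  | (d, idx), t :: s =>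
      if idx < cl.length then procSeg cl (d.insert (cl.getD idx 0) t, idx + 1) s
      else procSeg cl (d, idx) s

-- the common normal form: the insert sequence both programs perform, as a pair list
-- (clients matched against the slot list, falling back to `last`)
def pairsRun (last : List (String × Int)) :
    List Int → List (List (String × Int)) → List (Int × List (String × Int))
  | [], _ => []
  | c :: cl, t :: s => (c, t) :: pairsRun last cl s
  | c :: cl, [] => (c, last) :: pairsRun last cl []

theorem aInner_eq_procSeg (cl : List Int) (t : List (String × Int)) :
    ∀ (n : Nat) (st : PySem.Dict Int (List (String × Int)) × Nat),
      aInner cl t n st = procSeg cl st (List.replicate n t) := by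
  intro n
  induction n with
  | zero => intro st; cases st; rfl
  | succ n ih =>
      intro st
      cases st with
      | mk d idx =>
          simp only [aInner, List.replicate, procSeg]
          split <;> exact ih _

theorem procSeg_append (cl : List Int) :
    ∀ (s1 s2 : List (List (String × Int))) (st : PySem.Dict Int (List (String × Int)) × Nat),
      procSeg cl st (s1 ++ s2) = procSeg cl (procSeg cl st s1) s2 := by
  intro s1
  induction s1 with
  | nil => intro s2 st; cases st; rfl
  | cons t s ih =>
      intro s2 st
      cases st with
      | mk d idx =>
          simp only [List.cons_append, procSeg]
          split <;> exact ih _ _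

theorem foldA_eq_procSeg (cl : List Int) :
    ∀ (ts : List (List (String × Int))) (st : PySem.Dict Int (List (String × Int)) × Nat),
      ts.foldl (fun st tier => aInner cl tier (tierCount tier).toNat st) st
        = procSeg cl st (ts.flatMap (fun t => List.replicate (tierCount t).toNat t)) := by
  intro ts
  induction ts with
  | nil => intro st; cases st; rfl
  | cons t ts ih =>
      intro st
      simp only [List.foldl_cons, List.flatMap_cons]
      rw [ih, aInner_eq_procSeg, procSeg_append]

theorem procSeg_of_ge (cl : List Int) (d : PySem.Dict Int (List (String × Int))) (idx : Nat)
    (h : cl.length ≤ idx) :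
    ∀ s, procSeg cl (d, idx) s = (d, idx) := by
  intro s
  induction s with
  | nil => rfl
  | cons t s ih => simp only [procSeg, if_neg (by omega : ¬ idx < cl.length)]; exact ih

-- the remainder loop of A appends the leftover clients as pairsRun with an empty slot list
theorem rem_eq_pairsRun (cl : List Int) (last : List (String × Int)) :
    ∀ (n idx : Nat) (d : PySem.Dict Int (List (String × Int))), cl.length - idx = n →
      (PySem.List.pyRange (idx : Int) (cl.length : Int)).foldl
          (fun d i => d.insert (PySem.List.pyGetD cl i 0) last) d
        = (pairsRun last (cl.drop idx) []).foldl (fun d p => d.insert p.1 p.2) d := by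
  intro n
  induction n with
  | zero =>
      intro idx d h
      have hge : cl.length ≤ idx := by omega
      rw [PySem.List.pyRange_one_eq_nil (by exact_mod_cast hge), List.drop_eq_nil_of_le hge]
      rfl
  | succ n ih =>
      intro idx d h
      have hlt : idx < cl.length := by omega
      rw [PySem.List.pyRange_one_cons (by exact_mod_cast hlt)]
      simp only [List.foldl_cons]
      rw [← List.getElem_cons_drop hlt]
      have hget : PySem.List.pyGetD cl (idx : Int) 0 = cl[idx] := by
        rw [PySem.List.pyGetD_natCast]; exact List.getD_eq_getElem cl 0 hlt
      rw [hget]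
      show (PySem.List.pyRange ((idx : Int) + 1) (cl.length : Int)).foldl _ _ = _
      have : ((idx : Int) + 1) = ((idx + 1 : Nat) : Int) := by push_cast; ring
      rw [this, ih (idx + 1) _ (by omega)]
      rfl

-- A's whole computation = one insert fold over pairsRun
theorem procSeg_rem_eq_pairsRun (cl : List Int) (last : List (String × Int)) :
    ∀ (s : List (List (String × Int))) (idx : Nat) (d : PySem.Dict Int (List (String × Int))),
      (PySem.List.pyRange (((procSeg cl (d, idx) s).2 : Nat) : Int) (cl.length : Int)).foldl
          (fun d i => d.insert (PySem.List.pyGetD cl i 0) last) (procSeg cl (d, idx) s).1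
        = (pairsRun last (cl.drop idx) s).foldl (fun d p => d.insert p.1 p.2) d := by
  intro s
  induction s with
  | nil => intro idx d; exact rem_eq_pairsRun cl last (cl.length - idx) idx d rfl
  | cons t s ih =>
      intro idx d
      by_cases hlt : idx < cl.length
      · rw [← List.getElem_cons_drop hlt]
        simp only [procSeg, if_pos hlt]
        have hget : cl.getD idx 0 = cl[idx] := List.getD_eq_getElem cl 0 hlt
        rw [hget]
        exact ih (idx + 1) (d.insert cl[idx] t)
      · rw [procSeg_of_ge cl d idx (by omega) (t :: s),
            List.drop_eq_nil_of_le (by omega : cl.length ≤ idx)]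
        rw [PySem.List.pyRange_one_eq_nil (by exact_mod_cast (by omega : cl.length ≤ idx))]
        rfl

-- B side: zip against a replicate-chunked slot list peels off take/drop chunks
theorem zip_replicate_append (t : List (String × Int)) :
    ∀ (n : Nat) (cl : List Int) (s : List (List (String × Int))),
      cl.zip (List.replicate n t ++ s)
        = (cl.take n).map (fun c => (c, t)) ++ (cl.drop n).zip s := by
  intro n
  induction n with
  | zero => intro cl s; simp
  | succ n ih =>
      intro cl s
      cases cl with
      | nil => simp
      | cons c cl => simp only [List.replicate, List.cons_append, List.zip_cons_cons,
                       List.take_succ_cons, List.map_cons, List.drop_succ_cons, ih]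

-- B's tier fold: pairs collected so far ++ zip of the remaining clients with the slot list
theorem foldB_eq :
    ∀ (ts : List (List (String × Int))) (ps : List (Int × List (String × Int))) (rest : List Int),
      ts.foldl
        (fun (st : List (Int × List (String × Int)) × List Int) tier =>
          let n := max (tierCount tier) 0
          (st.1 ++ (PySem.List.slice st.2 none (some n)).map (fun c => (c, tier)),
           PySem.List.slice st.2 (some n) none))
        (ps, rest)
        = (ps ++ rest.zip (ts.flatMap (fun t => List.replicate (tierCount t).toNat t)),
           rest.drop (ts.flatMap (fun t => List.replicate (tierCount t).toNat t)).length) := by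
  intro ts
  induction ts with
  | nil => intro ps rest; simp
  | cons t ts ih =>
      intro ps rest
      simp only [List.foldl_cons, List.flatMap_cons]
      have hnn : (0 : Int) ≤ max (tierCount t) 0 := le_max_right _ _
      have htn : (max (tierCount t) 0).toNat = (tierCount t).toNat := by omega
      rw [PySem.List.slice_to _ hnn, PySem.List.slice_from _ hnn, htn, ih]
      rw [zip_replicate_append, List.drop_drop, List.append_assoc]
      simp [List.length_replicate]

-- pairsRun splits into the zipped prefix and the fallback tail
theorem pairsRun_eq_zip_append (last : List (String × Int)) :
    ∀ (cl : List Int) (s : List (List (String × Int))),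
      pairsRun last cl s
        = cl.zip s ++ (cl.drop s.length).map (fun c => (c, last)) := by
  intro cl
  induction cl with
  | nil => intro s; cases s <;> rfl
  | cons c cl ih =>
      intro s
      cases s with
      | nil =>
          simp only [pairsRun, ih [], List.zip_nil_right, List.nil_append,
            List.length_nil, List.drop_zero, List.map_cons]
      | cons t s =>
          simp only [pairsRun, List.zip_cons_cons, List.length_cons, List.drop_succ_cons,
            List.cons_append, ih]

-- ===== VERDICT (by name: the statement is the Claim_ definition above) =====
theorem assign_tiers_py_spec : Claim_equal_assign_tiers_py := by
  intro cl tiers _ _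
  unfold Spec_assign_tiers_py assign_tiers_py assign_tiers_py_alt
  simp only []
  rw [foldA_eq_procSeg, foldB_eq]
  refine congrArg PySem.Dict.items ?_
  rw [procSeg_rem_eq_pairsRun cl ((PySem.List.pyGet? tiers (-1)).getD [])
    (tiers.flatMap (fun t => List.replicate (tierCount t).toNat t)) 0 PySem.Dict.empty,
    List.drop_zero, pairsRun_eq_zip_append]
  rfl
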